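-- pv_equiv track=rewrite | github.com/wudangqibujie/my_text_classification | Hierarchical Classisify/encoder/bert_tf/dataset.py | _concate_tokens_info
-- ===== SOURCE A (Python) =====
-- def _concate_tokens_info(token_a, token_b):
--     tokens, seg_ids = [], []
--     tokens.append("[CLS]")
--     seg_ids.append(0)
--     for t in token_a:
--         tokens.append(t)
--         seg_ids.append(0)
--     tokens.append("[SEP]")
--     seg_ids.append(0)
--     for t in token_b:
--         tokens.append(t)
--         seg_ids.append(1)
--     tokens.append("[SEP]")
--     seg_ids.append(1)
--     return tokens, seg_ids
-- ===== SOURCE B (Python) =====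
-- def _concate_tokens_info(token_a, token_b):
--     a, b = list(token_a), list(token_b)
--     cut = len(a) + 2                # index where segment 1 starts
--     total = cut + len(b) + 1        # overall output length
--
--     def tok(i):
--         if i == 0:
--             return "[CLS]"
--         if i < cut - 1:
--             return a[i - 1]
--         if i == cut - 1:
--             return "[SEP]"
--         if i < total - 1:
--             return b[i - cut]
--         return "[SEP]"
--
--     tokens = [tok(i) for i in range(total)]
--     seg_ids = [0 if i < cut else 1 for i in range(total)]
--     return tokens, seg_ids
-- ===== Notes on version B (the rewrite author's own statement) =====
-- stated objective: alternative
-- what changed: Replaces the lockstep append loops with positional construction: output length and the segment cut point are computed up front, and each token and segment id is produced by index arithmetic (random access into the inputs) over range(total), instead of appending while walking the two lists.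
import Mathlib
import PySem

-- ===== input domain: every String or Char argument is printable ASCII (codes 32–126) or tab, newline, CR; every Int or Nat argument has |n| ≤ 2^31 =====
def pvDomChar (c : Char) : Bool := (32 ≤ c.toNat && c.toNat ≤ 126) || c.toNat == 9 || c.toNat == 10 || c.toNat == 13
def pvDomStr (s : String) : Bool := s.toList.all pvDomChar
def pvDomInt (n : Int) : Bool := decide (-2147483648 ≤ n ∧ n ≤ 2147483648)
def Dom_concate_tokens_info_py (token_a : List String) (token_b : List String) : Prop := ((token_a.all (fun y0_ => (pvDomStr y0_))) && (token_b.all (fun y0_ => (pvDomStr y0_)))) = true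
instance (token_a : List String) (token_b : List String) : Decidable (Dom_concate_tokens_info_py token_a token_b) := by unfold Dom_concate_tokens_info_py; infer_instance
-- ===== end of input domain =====

-- B builds the output positionally: each token / segment id is computed from its index (alternative decomposition; same O(n) cost).

-- ===== PORT A =====
-- A appends "[CLS]"/0, loops over token_a appending (t,0), appends "[SEP]"/0,
-- loops over token_b appending (t,1), appends "[SEP]"/1; lockstep state (tokens, seg_ids).
def concate_tokens_info_py (token_a : List String) (token_b : List String) : List String × List Int :=
  let st : List String × List Int := ([], [])
  let st := (st.1 ++ ["[CLS]"], st.2 ++ [(0 : Int)])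
  let st := token_a.foldl (fun st t => (st.1 ++ [t], st.2 ++ [(0 : Int)])) st
  let st := (st.1 ++ ["[SEP]"], st.2 ++ [(0 : Int)])
  let st := token_b.foldl (fun st t => (st.1 ++ [t], st.2 ++ [(1 : Int)])) st
  let st := (st.1 ++ ["[SEP]"], st.2 ++ [(1 : Int)])
  st

-- ===== PORT B =====
-- Source B's tok(i): positional lookup; indices a[i-1] / b[i-cut] are always in range when
-- tok is applied to i < total, so List.getD is exact for Python's a[i-1] here.
def pvTokAt (a b : List String) (cut total i : Nat) : String :=
  if i = 0 then "[CLS]"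
  else if i < cut - 1 then a.getD (i - 1) ""
  else if i = cut - 1 then "[SEP]"
  else if i < total - 1 then b.getD (i - cut) ""
  else "[SEP]"

-- range(total) over nonnegative Python ints is ported as List.range total.
def concate_tokens_info_py_alt (token_a : List String) (token_b : List String) : List String × List Int :=
  let cut := token_a.length + 2
  let total := cut + token_b.length + 1
  ((List.range total).map (pvTokAt token_a token_b cut total),
   (List.range total).map (fun i => if i < cut then (0 : Int) else 1))

-- ===== PRECONDITION & SPEC =====
def Spec_concate_tokens_info_py (token_a : List String) (token_b : List String) (out : List String × List Int) : Prop := out = concate_tokens_info_py_alt token_a token_b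
instance (token_a : List String) (token_b : List String) (out : List String × List Int) : Decidable (Spec_concate_tokens_info_py token_a token_b out) := by unfold Spec_concate_tokens_info_py; infer_instance

-- ===== CLAIM (what is proved, stated in full; the proofs are below) =====
def Claim_equal_concate_tokens_info_py : Prop := ∀ (token_a : List String) (token_b : List String), Dom_concate_tokens_info_py token_a token_b → Spec_concate_tokens_info_py token_a token_b (concate_tokens_info_py token_a token_b)

-- ===== LEMMAS AND PROOFS =====

theorem pv_getElem_cons_pos {α : Type} (x : α) (l : List α) (i : Nat) (h0 : i ≠ 0)
    (h : i < (x :: l).length) :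
    (x :: l)[i] = l[i - 1]'(by simp at h; omega) := by
  cases i with
  | zero => exact absurd rfl h0
  | succ k => simp

-- A's two foldl loops append elements and replicate the constant segment id.
theorem pv_foldl_append (l : List String) (c : Int) (t0 : List String) (s0 : List Int) :
    l.foldl (fun (st : List String × List Int) t => (st.1 ++ [t], st.2 ++ [c])) (t0, s0)
      = (t0 ++ l, s0 ++ List.replicate l.length c) := by
  induction l generalizing t0 s0 with
  | nil => simp
  | cons x xs ih => simp [List.foldl, ih, List.replicate_succ]

theorem pv_tokens_eq (a b : List String) :
    (List.range (a.length + 2 + b.length + 1)).map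
        (pvTokAt a b (a.length + 2) (a.length + 2 + b.length + 1))
      = "[CLS]" :: (a ++ "[SEP]" :: (b ++ ["[SEP]"])) := by
  apply List.ext_getElem
  · simp; omega
  · intro i h1 h2
    simp only [List.getElem_map, List.getElem_range, pvTokAt]
    simp only [List.length_map, List.length_range] at h1
    split_ifs with h0 ha hs hb
    · subst h0; rfl
    · rw [pv_getElem_cons_pos _ _ _ h0, List.getElem_append_left (by omega),
          List.getD_eq_getElem _ _ (by omega)]
    · rw [pv_getElem_cons_pos _ _ _ h0, List.getElem_append_right (by omega)]
      have : i - 1 - a.length = 0 := by omega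
      simp [this]
    · rw [pv_getElem_cons_pos _ _ _ h0, List.getElem_append_right (by omega),
          List.getD_eq_getElem _ _ (by omega)]
      have hne : i - 1 - a.length ≠ 0 := by omega
      rw [pv_getElem_cons_pos _ _ _ hne, List.getElem_append_left (by omega)]
      congr 1
      omega
    · rw [pv_getElem_cons_pos _ _ _ h0, List.getElem_append_right (by omega)]
      have hne : i - 1 - a.length ≠ 0 := by omega
      rw [pv_getElem_cons_pos _ _ _ hne, List.getElem_append_right (by omega)]
      simp

theorem pv_seg_eq (n m : Nat) :
    (List.range (n + m)).map (fun i => if i < n then (0 : Int) else 1)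
      = List.replicate n (0 : Int) ++ List.replicate m (1 : Int) := by
  apply List.ext_getElem
  · simp
  · intro i h1 h2
    simp only [List.getElem_map, List.getElem_range]
    by_cases h : i < n
    · rw [List.getElem_append_left (by simpa using h)]
      simp [h]
    · rw [List.getElem_append_right (by simpa using h)]
      simp [h]

theorem pv_seg_shape (n m : Nat) :
    (0 : Int) :: (List.replicate n (0 : Int) ++ (0 : Int) :: (List.replicate m (1 : Int) ++ [(1 : Int)])) =
    List.replicate (n + 2) (0 : Int) ++ List.replicate (m + 1) (1 : Int) := by
  induction n with
  | zero => simp [List.replicate_succ']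
  | succ k ih =>
      simpa [List.replicate_succ, List.cons_append] using congrArg (List.cons (0 : Int)) ih

-- ===== VERDICT (by name: the statement is the Claim_ definition above) =====
theorem concate_tokens_info_py_spec : Claim_equal_concate_tokens_info_py := by
  intro token_a token_b _
  show _ = _
  simp only [concate_tokens_info_py, concate_tokens_info_py_alt, pv_foldl_append]
  refine Prod.ext ?_ ?_
  · simpa using (pv_tokens_eq token_a token_b).symm
  · show ([] ++ [(0:Int)] ++ List.replicate token_a.length 0 ++ [0] ++ List.replicate token_b.length 1 ++ [1]) = _
    rw [show ([] ++ [(0:Int)] ++ List.replicate token_a.length 0 ++ [0] ++ List.replicate token_b.length 1 ++ [1])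
          = (0 : Int) :: (List.replicate token_a.length 0 ++ (0 : Int) :: (List.replicate token_b.length 1 ++ [1])) by simp,
        pv_seg_shape,
        show token_a.length + 2 + token_b.length + 1 = (token_a.length + 2) + (token_b.length + 1) by omega,
        pv_seg_eq]
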